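-- pv_equiv track=rewrite | github.com/junha6316/photo-grouper | packages/desktop/core/phash.py | _cluster_indices_by_hamming
-- ===== SOURCE A (Python) =====
-- from collections import defaultdict
-- from typing import Dict, List, Optional
--
-- class _UnionFind:
--     def __init__(self, size: int) -> None:
--         self._parent = list(range(size))
--         self._rank = [0] * size
--
--     def find(self, x: int) -> int:
--         while self._parent[x] != x:
--             self._parent[x] = self._parent[self._parent[x]]
--             x = self._parent[x]
--         return x
--
--     def union(self, x: int, y: int) -> None:
--         px, py = self.find(x), self.find(y)
--         if px == py:
--             return
--         if self._rank[px] < self._rank[py]: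
--             self._parent[px] = py
--         elif self._rank[px] > self._rank[py]:
--             self._parent[py] = px
--         else:
--             self._parent[py] = px
--             self._rank[px] += 1
--
--     def clusters(self) -> List[List[int]]:
--         clusters: Dict[int, List[int]] = defaultdict(list)
--         for idx in range(len(self._parent)):
--             clusters[self.find(idx)].append(idx)
--
--         cluster_entries = []
--         for indices in clusters.values():
--             indices.sort()
--             cluster_entries.append((indices[0], indices))
--         cluster_entries.sort(key=lambda item: item[0])
--         return [indices for _, indices in cluster_entries]
--
-- def hamming_distance(a: int, b: int) -> int:
--     """Compute Hamming distance between two hashes."""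
--     xor = a ^ b
--     try:
--         return xor.bit_count()
--     except AttributeError:
--         return bin(xor).count("1")
--
-- def _cluster_indices_by_hamming(
--     hashes: List[Optional[int]],
--     max_distance: int,
-- ) -> List[List[int]]:
--     if not hashes:
--         return []
--     uf = _UnionFind(len(hashes))
--     for i, hash_i in enumerate(hashes):
--         if hash_i is None:
--             continue
--         for j in range(i + 1, len(hashes)):
--             hash_j = hashes[j]
--             if hash_j is None:
--                 continue
--             if hamming_distance(hash_i, hash_j) <= max_distance:
--                 uf.union(i, j)
--     return uf.clusters()
-- ===== SOURCE B (Python) =====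
-- from typing import List, Optional
--
--
-- def _cluster_indices_by_hamming(
--     hashes: List[Optional[int]],
--     max_distance: int,
-- ) -> List[List[int]]:
--     n = len(hashes)
--     edges = []
--     for i in range(n):
--         hash_i = hashes[i]
--         if hash_i is None:
--             continue
--         for j in range(i + 1, n):
--             hash_j = hashes[j]
--             if hash_j is None:
--                 continue
--             if (hash_i ^ hash_j).bit_count() <= max_distance:
--                 edges.append((i, j))
--     # min-label propagation: labels converge to the minimum index of each
--     # connected component; grouping by label then yields the clusters already
--     # ordered (by minimum) with ascending members -- no sorting needed.
--     labels = list(range(n))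
--     changed = True
--     while changed:
--         changed = False
--         for i, j in edges:
--             if labels[i] < labels[j]:
--                 labels[j] = labels[i]
--                 changed = True
--             elif labels[j] < labels[i]:
--                 labels[i] = labels[j]
--                 changed = True
--     groups = {}
--     for idx in range(n):
--         groups.setdefault(labels[idx], []).append(idx)
--     return list(groups.values())
-- ===== Notes on version B (the rewrite author's own statement) =====
-- stated objective: alternative
-- what changed: Replaces the union-find (path-halving find, union by rank, dict-of-clusters with two sorts) by min-label propagation to a fixpoint over the close-pair edge list; each index's label converges to the minimum index of its connected component, so grouping by label yields the clusters already in order with ascending members and no sorting at all.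
import Mathlib
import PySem

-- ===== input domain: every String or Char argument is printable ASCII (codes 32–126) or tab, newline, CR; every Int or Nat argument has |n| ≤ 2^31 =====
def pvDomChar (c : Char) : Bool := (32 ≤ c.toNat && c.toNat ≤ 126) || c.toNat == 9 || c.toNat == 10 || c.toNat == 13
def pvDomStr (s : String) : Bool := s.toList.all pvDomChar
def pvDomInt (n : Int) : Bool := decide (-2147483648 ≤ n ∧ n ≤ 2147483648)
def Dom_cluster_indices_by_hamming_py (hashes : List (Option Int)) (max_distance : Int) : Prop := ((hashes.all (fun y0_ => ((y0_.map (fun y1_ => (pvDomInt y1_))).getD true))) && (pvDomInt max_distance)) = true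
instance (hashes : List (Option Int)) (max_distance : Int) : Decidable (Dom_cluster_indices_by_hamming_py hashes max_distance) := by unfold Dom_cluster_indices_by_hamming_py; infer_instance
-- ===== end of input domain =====

-- B replaces A's union-find + dict-of-clusters + two sorts by min-label propagation to a
-- fixpoint over the close-pair edge list; same return value (alternative algorithm, no speed claim).

-- ===== PORT A =====
-- All indices are the naturals 0..n-1, so Python's range / list indexing is List.range / getD here.

-- hamming_distance(a, b): (a ^ b).bit_count()  (Python-exact on negatives via PySem)
def pvHamming (a b : Int) : Nat := PySem.Int.bitCount (PySem.Int.bxor a b)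

-- _UnionFind.find with path halving; the fuel (parent list length) bounds the while loop,
-- which Python's invariant guarantees terminates within that many steps
def pvUFFind : Nat → List Nat → Nat → List Nat × Nat
  | 0, p, x => (p, x)
  | fuel+1, p, x =>
    let px := p.getD x 0
    if px = x then (p, x)
    else pvUFFind fuel (p.set x (p.getD px 0)) (p.getD px 0)

-- _UnionFind.union (union by rank; find mutates the parent list, as in Python)
def pvUFUnion (p : List Nat) (rank : List Nat) (x y : Nat) : List Nat × List Nat :=
  let f1 := pvUFFind p.length p x
  let f2 := pvUFFind f1.1.length f1.1 y
  let px := f1.2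
  let py := f2.2
  let p2 := f2.1
  if px = py then (p2, rank)
  else if rank.getD px 0 < rank.getD py 0 then (p2.set px py, rank)
  else if rank.getD py 0 < rank.getD px 0 then (p2.set py px, rank)
  else (p2.set py px, rank.set px (rank.getD px 0 + 1))

def cluster_indices_by_hamming_py (hashes : List (Option Int)) (max_distance : Int) : List (List Int) :=
  if hashes = [] then []
  else
    let n := hashes.length
    -- for i, hash_i in enumerate(hashes): for j in range(i+1, len(hashes)): … union(i, j)
    let st := (List.range n).foldl (fun (st : List Nat × List Nat) i =>
      match hashes.getD i none with
      | none => st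
      | some hi =>
        (List.range' (i+1) (n - (i+1))).foldl (fun st j =>
          match hashes.getD j none with
          | none => st
          | some hj =>
            if (pvHamming hi hj : Int) ≤ max_distance then pvUFUnion st.1 st.2 i j else st) st)
      (List.range n, List.replicate n 0)
    -- _UnionFind.clusters(): defaultdict(list) keyed by find(idx) (find mutates), sort, sort by first
    let fin := (List.range n).foldl (fun (acc : List Nat × PySem.Dict Nat (List Nat)) idx =>
      let f := pvUFFind acc.1.length acc.1 idx
      (f.1, acc.2.modify f.2 [] (· ++ [idx]))) (st.1, PySem.Dict.empty)
    let entries := fin.2.values.map (fun ind =>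
      let ind := PySem.List.sorted ind (fun x => x)
      (PySem.List.pyGetD ind 0 0, ind))
    let entries := PySem.List.sorted entries (fun e => e.1)
    entries.map (fun e => e.2.map (fun k => (k : Int)))

-- ===== PORT B =====

-- the list of close pairs (i, j), i < j, both hashes present
def pvEdges (hashes : List (Option Int)) (max_distance : Int) : List (Nat × Nat) :=
  (List.range hashes.length).foldl (fun acc i =>
    match hashes.getD i none with
    | none => acc
    | some hi =>
      (List.range' (i+1) (hashes.length - (i+1))).foldl (fun acc j =>
        match hashes.getD j none with
        | none => acc
        | some hj =>
          if (pvHamming hi hj : Int) ≤ max_distance then acc ++ [(i, j)] else acc) acc) []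

-- one pass of min-label propagation over the edges
def pvPass (edges : List (Nat × Nat)) (labels : List Nat) : List Nat × Bool :=
  edges.foldl (fun (st : List Nat × Bool) e =>
    let li := st.1.getD e.1 0
    let lj := st.1.getD e.2 0
    if li < lj then (st.1.set e.2 li, true)
    else if lj < li then (st.1.set e.1 lj, true)
    else st) (labels, false)

-- while changed: …  (the fuel bounds the loop: the label sum strictly decreases each changed pass)
def pvLoop : Nat → List (Nat × Nat) → List Nat → List Nat
  | 0, _, l => l
  | fuel+1, edges, l =>
    let r := pvPass edges l
    if r.2 then pvLoop fuel edges r.1 else r.1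

def cluster_indices_by_hamming_py_alt (hashes : List (Option Int)) (max_distance : Int) : List (List Int) :=
  let n := hashes.length
  let edges := pvEdges hashes max_distance
  let labels := pvLoop (n * n + 1) edges (List.range n)
  let d := (List.range n).foldl (fun (d : PySem.Dict Nat (List Nat)) idx =>
    d.modify (labels.getD idx 0) [] (· ++ [idx])) PySem.Dict.empty
  d.values.map (fun v => v.map (fun k => (k : Int)))

-- ===== PRECONDITION & SPEC =====
def Spec_cluster_indices_by_hamming_py (hashes : List (Option Int)) (max_distance : Int) (out : List (List Int)) : Prop := out = cluster_indices_by_hamming_py_alt hashes max_distance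
instance (hashes : List (Option Int)) (max_distance : Int) (out : List (List Int)) : Decidable (Spec_cluster_indices_by_hamming_py hashes max_distance out) := by unfold Spec_cluster_indices_by_hamming_py; infer_instance

-- ===== CLAIM (what is proved, stated in full; the proofs are below) =====
def Claim_equal_cluster_indices_by_hamming_py : Prop := ∀ (hashes : List (Option Int)) (max_distance : Int), Dom_cluster_indices_by_hamming_py hashes max_distance → Spec_cluster_indices_by_hamming_py hashes max_distance (cluster_indices_by_hamming_py hashes max_distance)

-- ===== LEMMAS AND PROOFS =====

def pvStep (p : List Nat) (x : Nat) : Nat := p.getD x 0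
def pvIter (p : List Nat) : Nat → Nat → Nat
  | 0, x => x
  | k+1, x => pvIter p k (pvStep p x)
def pvIsRoot (p : List Nat) (x : Nat) : Prop := pvStep p x = x
def pvRootOf (p : List Nat) (x r : Nat) : Prop := ∃ k, pvIter p k x = r ∧ pvIsRoot p r
def pvWF (p : List Nat) : Prop :=
  (∀ x, x < p.length → p.getD x 0 < p.length) ∧ (∀ x, ∃ k, pvIsRoot p (pvIter p k x))
def pvSame (p : List Nat) (a b : Nat) : Prop := ∃ r, pvRootOf p a r ∧ pvRootOf p b r
def pvDepth (p : List Nat) (x : Nat) (d : Nat) : Prop :=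
  pvIsRoot p (pvIter p d x) ∧ ∀ e, e < d → ¬ pvIsRoot p (pvIter p e x)




theorem pvIter_succ (p : List Nat) (k x : Nat) : pvIter p (k+1) x = pvIter p k (pvStep p x) := rfl

theorem pvIter_add (p : List Nat) (a b x : Nat) :
    pvIter p (a + b) x = pvIter p b (pvIter p a x) := by
  induction a generalizing x with
  | zero => simp [pvIter]
  | succ a ih =>
    have : a + 1 + b = (a + b) + 1 := by omega
    rw [this, pvIter_succ, pvIter_succ, ih]

theorem pvIter_fix (p : List Nat) (k r : Nat) (h : pvIsRoot p r) : pvIter p k r = r := by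
  induction k with
  | zero => rfl
  | succ k ih => rw [pvIter_succ]; unfold pvIsRoot at h; rw [h]; exact ih

theorem pvRootOf_unique {p : List Nat} {x r r' : Nat}
    (h1 : pvRootOf p x r) (h2 : pvRootOf p x r') : r = r' := by
  obtain ⟨k, hk, hr⟩ := h1
  obtain ⟨k', hk', hr'⟩ := h2
  rcases Nat.le_total k k' with h | h
  · have : pvIter p (k + (k' - k)) x = pvIter p (k' - k) r := by rw [pvIter_add, hk]
    rw [show k + (k' - k) = k' by omega, hk', pvIter_fix p _ r hr] at this
    exact this.symm
  · have : pvIter p (k' + (k - k')) x = pvIter p (k - k') r' := by rw [pvIter_add, hk']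
    rw [show k' + (k - k') = k by omega, hk, pvIter_fix p _ r' hr'] at this
    exact this

theorem pvRootOf_self {p : List Nat} {x : Nat} (h : pvIsRoot p x) : pvRootOf p x x := ⟨0, rfl, h⟩

theorem pvRootOf_step {p : List Nat} {x r : Nat} (h : pvRootOf p (pvStep p x) r) :
    pvRootOf p x r := by
  obtain ⟨k, hk, hr⟩ := h
  exact ⟨k + 1, by rw [pvIter_succ]; exact hk, hr⟩

theorem pvRootOf_unstep {p : List Nat} {x r : Nat} (h : pvRootOf p x r) (hx : ¬ pvIsRoot p x) :
    pvRootOf p (pvStep p x) r := by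
  obtain ⟨k, hk, hr⟩ := h
  cases k with
  | zero => subst hk; exact absurd hr hx
  | succ k => exact ⟨k, hk, hr⟩

theorem pvRootOf_total {p : List Nat} (hWF : pvWF p) (x : Nat) : ∃ r, pvRootOf p x r := by
  obtain ⟨k, hk⟩ := hWF.2 x
  exact ⟨pvIter p k x, ⟨k, rfl, hk⟩⟩

theorem pvDepth_exists {p : List Nat} (hWF : pvWF p) (x : Nat) : ∃ d, pvDepth p x d := by
  letI : DecidablePred fun k => pvIsRoot p (pvIter p k x) :=
    fun k => by unfold pvIsRoot; exact Nat.decEq _ _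
  have h := hWF.2 x
  exact ⟨Nat.find h, Nat.find_spec h, fun e he => Nat.find_min h he⟩

theorem pvDepth_unique {p : List Nat} {x d d' : Nat}
    (h : pvDepth p x d) (h' : pvDepth p x d') : d = d' := by
  rcases Nat.lt_trichotomy d d' with hlt | he | hlt
  · exact absurd h.1 (h'.2 d hlt)
  · exact he
  · exact absurd h'.1 (h.2 d' hlt)

theorem pvDepth_step {p : List Nat} {x d : Nat} (h : pvDepth p x (d+1)) :
    pvDepth p (pvStep p x) d :=
  ⟨h.1, fun e he => h.2 (e+1) (by omega)⟩

theorem pvDepth_rootOf {p : List Nat} {x d : Nat} (h : pvDepth p x d) :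
    pvRootOf p x (pvIter p d x) := ⟨d, rfl, h.1⟩

theorem pvDepth_zero_of_root {p : List Nat} {x : Nat} (h : pvIsRoot p x) : pvDepth p x 0 :=
  ⟨h, fun e he => by omega⟩

theorem pvDepth_pos {p : List Nat} {x d : Nat} (h : pvDepth p x d) (hx : ¬ pvIsRoot p x) :
    0 < d := by
  cases d with
  | zero => exact absurd h.1 hx
  | succ d => omega

theorem pvIter_lt {p : List Nat} (hWF : pvWF p) {x : Nat} (hx : x < p.length) (k : Nat) :
    pvIter p k x < p.length := by
  induction k generalizing x with
  | zero => exact hx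
  | succ k ih => rw [pvIter_succ]; exact ih (hWF.1 x hx)

theorem pvDepth_iter {p : List Nat} {x d : Nat} (h : pvDepth p x d) (m : Nat) (hm : m ≤ d) :
    pvDepth p (pvIter p m x) (d - m) := by
  induction m generalizing x d with
  | zero => simpa [pvIter] using h
  | succ m ih =>
    cases d with
    | zero => omega
    | succ d =>
      have := ih (pvDepth_step h) (by omega)
      simpa [pvIter_succ, Nat.succ_sub_succ] using this

theorem pvDepth_le_length {p : List Nat} (hWF : pvWF p) {x d : Nat} (hx : x < p.length)
    (h : pvDepth p x d) : d ≤ p.length := by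
  by_contra hgt
  push_neg at hgt
  have hlen : 0 < p.length := by
    rcases Nat.eq_zero_or_pos p.length with h0 | h0
    · omega
    · exact h0
  have hcard : Fintype.card (Fin p.length) < Fintype.card (Fin (p.length + 1)) := by simp
  obtain ⟨i, j, hij, hfe⟩ := Fintype.exists_ne_map_eq_of_card_lt
    (fun i : Fin (p.length + 1) => (⟨pvIter p i x, pvIter_lt hWF hx i⟩ : Fin p.length)) hcard
  -- wlog i < j
  rcases Nat.lt_or_ge i.val j.val with hlt | hge
  · have heq : pvIter p i.val x = pvIter p j.val x := congrArg Fin.val hfe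
    have hj : j.val ≤ p.length := by omega
    have hroot : pvIsRoot p (pvIter p (i.val + (d - j.val)) x) := by
      rw [pvIter_add, heq, ← pvIter_add, show j.val + (d - j.val) = d by omega]
      exact h.1
    exact h.2 _ (by omega) hroot
  · have hlt : j.val < i.val := by
      rcases Nat.lt_or_ge j.val i.val with h' | h'
      · exact h'
      · exact absurd (Fin.ext (by omega)) hij
    have heq : pvIter p j.val x = pvIter p i.val x := (congrArg Fin.val hfe).symm
    have hi : i.val ≤ p.length := by omega
    have hroot : pvIsRoot p (pvIter p (j.val + (d - i.val)) x) := by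
      rw [pvIter_add, heq, ← pvIter_add, show i.val + (d - i.val) = d by omega]
      exact h.1
    exact h.2 _ (by omega) hroot

theorem pvStep_set (p : List Nat) (a v z : Nat) :
    pvStep (p.set a v) z = if z = a ∧ a < p.length then v else pvStep p z := by
  unfold pvStep List.getD
  rcases Nat.lt_or_ge a p.length with hlt | hge
  · by_cases hz : z = a
    · subst hz
      simp [List.getElem?_set, hlt]
    · simp [List.getElem?_set, Ne.symm hz, hz]
  · rw [List.set_eq_of_length_le hge]
    rw [if_neg (by omega)]

-- a pointer update to a same-root, strictly shallower target preserves every root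
theorem pvSet_preserves (p : List Nat) {a b : Nat}
    (hWF : pvWF p) (ha : a < p.length) (hb : b < p.length)
    (hroot : ∀ r, pvRootOf p a r → pvRootOf p b r)
    (hdep : ∀ da db, pvDepth p a da → pvDepth p b db → db < da) :
    pvWF (p.set a b) ∧ (∀ z r, pvRootOf (p.set a b) z r ↔ pvRootOf p z r) := by
  set p' := p.set a b with hp'
  have hlen : p'.length = p.length := by simp [hp']
  have hstep : ∀ z, pvStep p' z = if z = a ∧ a < p.length then b else pvStep p z :=
    pvStep_set p a b
  -- forward direction by strong induction on the depth of z
  have main : ∀ d z r, pvDepth p z d → pvRootOf p z r → pvRootOf p' z r := by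
    intro d
    induction d using Nat.strong_induction_on with
    | _ d IH =>
      intro z r hdz hrz
      by_cases hzr : pvIsRoot p z
      · have hre : r = z := pvRootOf_unique hrz (pvRootOf_self hzr)
        have hza : z ≠ a := by
          intro h
          obtain ⟨da, hda⟩ := pvDepth_exists hWF a
          obtain ⟨db, hdb⟩ := pvDepth_exists hWF b
          have h1 := hdep da db hda hdb
          have h2 : da = 0 := pvDepth_unique hda (pvDepth_zero_of_root (h ▸ hzr))
          omega
        have hroot' : pvIsRoot p' z := by
          unfold pvIsRoot
          rw [hstep z, if_neg (by tauto)]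
          exact hzr
        rw [hre]
        exact pvRootOf_self hroot' 
      · have hd_pos : 0 < d := pvDepth_pos hdz hzr
        by_cases hza : z = a
        · subst hza
          -- z = a : step to b, which has the same root and smaller depth
          have hrb : pvRootOf p b r := hroot r hrz
          obtain ⟨db, hdb⟩ := pvDepth_exists hWF b
          have hlt : db < d := hdep d db hdz hdb
          have hb' : pvRootOf p' b r := IH db hlt b r hdb hrb
          have : pvStep p' z = b := by rw [hstep z, if_pos ⟨rfl, ha⟩]
          exact pvRootOf_step (by rw [this]; exact hb')
        · have hz' : pvRootOf p (pvStep p z) r := pvRootOf_unstep hrz hzr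
          have hdz' : pvDepth p (pvStep p z) (d - 1) := by
            cases d with
            | zero => omega
            | succ d => simpa using pvDepth_step hdz
          have hrec : pvRootOf p' (pvStep p z) r := IH (d-1) (by omega) _ r hdz' hz'
          have : pvStep p' z = pvStep p z := by rw [hstep z, if_neg (by tauto)]
          exact pvRootOf_step (by rw [this]; exact hrec)
  constructor
  · constructor
    · intro x hx
      rw [hlen] at hx
      have := hstep x
      unfold pvStep at this
      rw [hlen]
      by_cases h : x = a ∧ a < p.length
      · rw [this, if_pos h]; exact hb
      · rw [this, if_neg h]; exact hWF.1 x hx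
    · intro x
      obtain ⟨r, hr⟩ := pvRootOf_total hWF x
      obtain ⟨d, hd⟩ := pvDepth_exists hWF x
      obtain ⟨k, hk, hroot'⟩ := main d x r hd hr
      exact ⟨k, by rw [hk]; exact hroot'⟩
  · intro z r
    constructor
    · intro h
      obtain ⟨r', hr'⟩ := pvRootOf_total hWF z
      obtain ⟨d, hd⟩ := pvDepth_exists hWF z
      have := main d z r' hd hr'
      have : r = r' := pvRootOf_unique h this
      subst this
      exact hr'
    · intro h
      obtain ⟨d, hd⟩ := pvDepth_exists hWF z
      exact main d z r hd h

-- linking root r2 under root r1 merges exactly the two classes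
theorem pvLink_spec (p : List Nat) {r1 r2 : Nat}
    (hWF : pvWF p) (h1 : pvIsRoot p r1) (h2 : pvIsRoot p r2) (hne : r1 ≠ r2)
    (hl1 : r1 < p.length) (hl2 : r2 < p.length) :
    pvWF (p.set r2 r1) ∧
    (∀ z r, pvRootOf (p.set r2 r1) z r ↔
      ((pvRootOf p z r ∧ r ≠ r2) ∨ (pvRootOf p z r2 ∧ r = r1))) := by
  set p' := p.set r2 r1 with hp'
  have hstep : ∀ z, pvStep p' z = if z = r2 ∧ r2 < p.length then r1 else pvStep p z :=
    pvStep_set p r2 r1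
  have hr1' : pvIsRoot p' r1 := by
    unfold pvIsRoot
    rw [hstep r1, if_neg (by tauto)]
    exact h1
  have hr2' : pvRootOf p' r2 r1 := by
    have : pvStep p' r2 = r1 := by rw [hstep r2, if_pos ⟨rfl, hl2⟩]
    exact pvRootOf_step (by rw [this]; exact pvRootOf_self hr1')
  have main : ∀ d z r, pvDepth p z d → pvRootOf p z r →
      pvRootOf p' z (if r = r2 then r1 else r) := by
    intro d
    induction d using Nat.strong_induction_on with
    | _ d IH =>
      intro z r hdz hrz
      by_cases hzr : pvIsRoot p z
      · have hre : r = z := pvRootOf_unique hrz (pvRootOf_self hzr)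
        by_cases hz2 : z = r2
        · rw [hre, if_pos hz2, hz2]
          exact hr2'
        · rw [hre, if_neg hz2]
          have : pvIsRoot p' z := by
            unfold pvIsRoot
            rw [hstep z, if_neg (by tauto)]
            exact hzr
          exact pvRootOf_self this
      · have hd_pos : 0 < d := pvDepth_pos hdz hzr
        have hz2 : z ≠ r2 := fun h => hzr (h ▸ h2)
        have hz' : pvRootOf p (pvStep p z) r := pvRootOf_unstep hrz hzr
        have hdz' : pvDepth p (pvStep p z) (d - 1) := by
          cases d with
          | zero => omega
          | succ d => simpa using pvDepth_step hdz
        have hrec := IH (d-1) (by omega) _ r hdz' hz'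
        have : pvStep p' z = pvStep p z := by rw [hstep z, if_neg (by tauto)]
        exact pvRootOf_step (by rw [this]; exact hrec)
  have hWF' : pvWF p' := by
    constructor
    · intro x hx
      have hlen : p'.length = p.length := by simp [hp']
      rw [hlen] at hx ⊢
      have := hstep x
      unfold pvStep at this
      by_cases h : x = r2 ∧ r2 < p.length
      · rw [this, if_pos h]; exact hl1
      · rw [this, if_neg h]; exact hWF.1 x hx
    · intro x
      obtain ⟨r, hr⟩ := pvRootOf_total hWF x
      obtain ⟨d, hd⟩ := pvDepth_exists hWF x
      obtain ⟨k, hk, hroot'⟩ := main d x r hd hr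
      exact ⟨k, by rw [hk]; exact hroot'⟩
  refine ⟨hWF', ?_⟩
  intro z r
  constructor
  · intro h
    obtain ⟨r', hr'⟩ := pvRootOf_total hWF z
    obtain ⟨d, hd⟩ := pvDepth_exists hWF z
    have hm := main d z r' hd hr'
    have heq : r = if r' = r2 then r1 else r' := pvRootOf_unique h hm
    by_cases h2' : r' = r2
    · right
      rw [if_pos h2'] at heq
      exact ⟨h2' ▸ hr', heq⟩
    · left
      rw [if_neg h2'] at heq
      exact ⟨heq ▸ hr', heq ▸ h2'⟩
  · rintro (⟨hr, hne2⟩ | ⟨hr, rfl⟩)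
    · obtain ⟨d, hd⟩ := pvDepth_exists hWF z
      have := main d z r hd hr
      rwa [if_neg hne2] at this
    · obtain ⟨d, hd⟩ := pvDepth_exists hWF z
      have := main d z r2 hd hr
      rwa [if_pos rfl] at this

theorem pvDepth_gp {p : List Nat} {x d : Nat} (h : pvDepth p x d) (hx : ¬ pvIsRoot p x) :
    pvDepth p (pvStep p (pvStep p x)) (d - 2) := by
  cases d with
  | zero => exact absurd h.1 hx
  | succ e =>
    have h1 : pvDepth p (pvStep p x) e := pvDepth_step h
    cases e with
    | zero =>
      have hroot : pvIsRoot p (pvStep p x) := h1.1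
      have : pvStep p (pvStep p x) = pvStep p x := hroot
      rw [this]
      exact pvDepth_zero_of_root hroot
    | succ f =>
      have := pvDepth_step h1
      simpa using this

theorem pvRootOf_gp {p : List Nat} {x r : Nat} (h : pvRootOf p x r) (hx : ¬ pvIsRoot p x) :
    pvRootOf p (pvStep p (pvStep p x)) r := by
  have h1 : pvRootOf p (pvStep p x) r := pvRootOf_unstep h hx
  by_cases hr : pvIsRoot p (pvStep p x)
  · have : pvStep p (pvStep p x) = pvStep p x := hr
    rw [this]
    exact h1
  · exact pvRootOf_unstep h1 hr

theorem pvIter_set_avoid (p : List Nat) (a v : Nat) :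
    ∀ (k g : Nat), (∀ m, m < k → pvIter p m g ≠ a) → pvIter (p.set a v) k g = pvIter p k g := by
  intro k
  induction k with
  | zero => intro g _; rfl
  | succ k ih =>
    intro g hav
    have hga : g ≠ a := by
      have := hav 0 (by omega)
      simpa [pvIter] using this
    have hst : pvStep (p.set a v) g = pvStep p g := by
      rw [pvStep_set, if_neg (by tauto)]
    rw [pvIter_succ, pvIter_succ, hst]
    exact ih (pvStep p g) (fun m hm => hav (m+1) (by omega))

theorem pvDepth_set_of_avoid {p : List Nat} {a v g dg : Nat}
    (hd : pvDepth p g dg) (hav : ∀ m, m ≤ dg → pvIter p m g ≠ a) :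
    pvDepth (p.set a v) g dg := by
  have hit : ∀ m, m ≤ dg → pvIter (p.set a v) m g = pvIter p m g := by
    intro m hm
    exact pvIter_set_avoid p a v m g (fun e he => hav e (by omega))
  have hstep_eq : ∀ m, m ≤ dg → pvStep (p.set a v) (pvIter p m g) = pvStep p (pvIter p m g) := by
    intro m hm
    rw [pvStep_set, if_neg (by exact fun hc => hav m hm hc.1)]
  constructor
  · unfold pvIsRoot
    rw [hit dg (by omega), hstep_eq dg (by omega)]
    exact hd.1
  · intro e he hroot
    unfold pvIsRoot at hroot
    rw [hit e (by omega), hstep_eq e (by omega)] at hroot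
    exact hd.2 e he hroot

theorem pvRootOf_lt {p : List Nat} (hWF : pvWF p) {x r : Nat} (hx : x < p.length)
    (h : pvRootOf p x r) : r < p.length := by
  obtain ⟨k, hk, _⟩ := h
  rw [← hk]
  exact pvIter_lt hWF hx k

theorem pvFind_spec : ∀ (fuel : Nat) (p : List Nat) (x : Nat), pvWF p → x < p.length →
    (∃ d, d ≤ fuel ∧ pvDepth p x d) →
    pvWF (pvUFFind fuel p x).1 ∧ (pvUFFind fuel p x).1.length = p.length ∧
    pvRootOf p x (pvUFFind fuel p x).2 ∧
    (∀ z r, pvRootOf (pvUFFind fuel p x).1 z r ↔ pvRootOf p z r) := by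
  intro fuel
  induction fuel with
  | zero =>
    intro p x hWF hx hex
    obtain ⟨d, hdle, hd⟩ := hex
    have hd0 : d = 0 := by omega
    subst hd0
    exact ⟨hWF, rfl, pvRootOf_self hd.1, fun z r => Iff.rfl⟩
  | succ fuel IH =>
    intro p x hWF hx hex
    obtain ⟨d, hdle, hd⟩ := hex
    by_cases hroot : pvIsRoot p x
    · have : pvUFFind (fuel+1) p x = (p, x) := by
        unfold pvIsRoot pvStep List.getD at hroot
        simp [pvUFFind, List.getD, hroot]
      rw [this]
      exact ⟨hWF, rfl, pvRootOf_self hroot, fun z r => Iff.rfl⟩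
    · have hne : p.getD x 0 ≠ x := hroot
      have hred : pvUFFind (fuel+1) p x
          = pvUFFind fuel (p.set x (pvStep p (pvStep p x))) (pvStep p (pvStep p x)) := by
        unfold List.getD at hne
        simp [pvUFFind, List.getD, pvStep, hne]
      set g := pvStep p (pvStep p x) with hg
      have hsx_lt : pvStep p x < p.length := hWF.1 x hx
      have hg_lt : g < p.length := hWF.1 _ hsx_lt
      have hdg : pvDepth p g (d - 2) := pvDepth_gp hd hroot
      have hdpos : 0 < d := pvDepth_pos hd hroot
      have hset := pvSet_preserves p hWF hx hg_lt
        (fun r hr => pvRootOf_gp hr hroot)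
        (by
          intro da db hda hdb
          have h1 : da = d := pvDepth_unique hda hd
          have h2 : db = d - 2 := pvDepth_unique hdb hdg
          omega)
      obtain ⟨hWF', hiff'⟩ := hset
      have hav : ∀ m, m ≤ d - 2 → pvIter p m g ≠ x := by
        intro m hm heq
        have := pvDepth_iter hdg m hm
        rw [heq] at this
        have : d = d - 2 - m := pvDepth_unique hd this
        omega
      have hdg' : pvDepth (p.set x g) g (d - 2) := pvDepth_set_of_avoid hdg hav
      have hglen : g < (p.set x g).length := by simpa using hg_lt
      have hrec := IH (p.set x g) g hWF' hglen ⟨d - 2, by omega, hdg'⟩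
      obtain ⟨hWFf, hlenf, hrootf, hifff⟩ := hrec
      rw [hred]
      refine ⟨hWFf, by simpa using hlenf, ?_, ?_⟩
      · have h1 : pvRootOf p g (pvUFFind fuel (p.set x g) g).2 := (hiff' _ _).mp hrootf
        exact pvRootOf_step (pvRootOf_step h1)
      · intro z r
        rw [hifff z r, hiff' z r]

theorem pvSame_symm {p : List Nat} {a b : Nat} (h : pvSame p a b) : pvSame p b a := by
  obtain ⟨r, h1, h2⟩ := h
  exact ⟨r, h2, h1⟩

theorem pvSame_trans {p : List Nat} {a b c : Nat} (h1 : pvSame p a b) (h2 : pvSame p b c) :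
    pvSame p a c := by
  obtain ⟨r, ha, hb⟩ := h1
  obtain ⟨r', hb', hc⟩ := h2
  rw [pvRootOf_unique hb hb'] at ha
  exact ⟨r', ha, hc⟩

theorem pvSame_iff_of_rootiff {p' p : List Nat}
    (h : ∀ z r, pvRootOf p' z r ↔ pvRootOf p z r) (a b : Nat) :
    pvSame p' a b ↔ pvSame p a b := by
  unfold pvSame
  constructor
  · rintro ⟨r, h1, h2⟩
    exact ⟨r, (h _ _).mp h1, (h _ _).mp h2⟩
  · rintro ⟨r, h1, h2⟩
    exact ⟨r, (h _ _).mpr h1, (h _ _).mpr h2⟩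


theorem pvSame_iff_root_eq {p : List Nat} {a ra b rb : Nat}
    (hra : pvRootOf p a ra) (hrb : pvRootOf p b rb) :
    pvSame p a b ↔ ra = rb := by
  constructor
  · rintro ⟨r, h1, h2⟩
    rw [← pvRootOf_unique h1 hra, ← pvRootOf_unique h2 hrb]
  · intro h
    exact ⟨ra, hra, h ▸ hrb⟩

theorem pvSame_link_char {p' p : List Nat} (hWF : pvWF p) {w l rx ry : Nat} (x y : Nat)
    (hrx : pvRootOf p x rx) (hry : pvRootOf p y ry)
    (hwl : (w = rx ∧ l = ry) ∨ (w = ry ∧ l = rx)) (hne : w ≠ l)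
    (hiff : ∀ z r, pvRootOf p' z r ↔ ((pvRootOf p z r ∧ r ≠ l) ∨ (pvRootOf p z l ∧ r = w))) :
    ∀ a b, pvSame p' a b ↔
      (pvSame p a b ∨ (pvSame p a x ∧ pvSame p b y) ∨ (pvSame p a y ∧ pvSame p b x)) := by
  intro a b
  obtain ⟨ra, hra⟩ := pvRootOf_total hWF a
  obtain ⟨rb, hrb⟩ := pvRootOf_total hWF b
  have hra' : pvRootOf p' a (if ra = l then w else ra) := by
    by_cases h : ra = l
    · rw [if_pos h]
      exact (hiff a w).mpr (Or.inr ⟨h ▸ hra, rfl⟩)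
    · rw [if_neg h]
      exact (hiff a ra).mpr (Or.inl ⟨hra, h⟩)
  have hrb' : pvRootOf p' b (if rb = l then w else rb) := by
    by_cases h : rb = l
    · rw [if_pos h]
      exact (hiff b w).mpr (Or.inr ⟨h ▸ hrb, rfl⟩)
    · rw [if_neg h]
      exact (hiff b rb).mpr (Or.inl ⟨hrb, h⟩)
  rw [pvSame_iff_root_eq hra' hrb',
      pvSame_iff_root_eq hra hrb, pvSame_iff_root_eq hra hrx, pvSame_iff_root_eq hrb hry,
      pvSame_iff_root_eq hra hry, pvSame_iff_root_eq hrb hrx]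
  rcases hwl with ⟨rfl, rfl⟩ | ⟨rfl, rfl⟩ <;> constructor <;> intro hgoal <;>
    (try rcases hgoal with h | ⟨h1, h2⟩ | ⟨h1, h2⟩) <;> split_ifs at * <;> omega

theorem pvUnion_spec (p rank : List Nat) (x y : Nat) (hWF : pvWF p)
    (hx : x < p.length) (hy : y < p.length) :
    pvWF (pvUFUnion p rank x y).1 ∧ (pvUFUnion p rank x y).1.length = p.length ∧
    (∀ a b, pvSame (pvUFUnion p rank x y).1 a b ↔
      (pvSame p a b ∨ (pvSame p a x ∧ pvSame p b y) ∨ (pvSame p a y ∧ pvSame p b x))) := by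
  have hex1 : ∃ d, d ≤ p.length ∧ pvDepth p x d := by
    obtain ⟨d, hd⟩ := pvDepth_exists hWF x
    exact ⟨d, pvDepth_le_length hWF hx hd, hd⟩
  have h1 := pvFind_spec p.length p x hWF hx hex1
  obtain ⟨hWF1, hlen1, hrx, hiff1⟩ := h1
  set f1 := pvUFFind p.length p x with hf1
  have hy1 : y < f1.1.length := by rw [hlen1]; exact hy
  have hex2 : ∃ d, d ≤ f1.1.length ∧ pvDepth f1.1 y d := by
    obtain ⟨d, hd⟩ := pvDepth_exists hWF1 y
    exact ⟨d, pvDepth_le_length hWF1 hy1 hd, hd⟩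
  have h2 := pvFind_spec f1.1.length f1.1 y hWF1 hy1 hex2
  obtain ⟨hWF2, hlen2, hry1, hiff2⟩ := h2
  set f2 := pvUFFind f1.1.length f1.1 y with hf2
  have hry : pvRootOf p y f2.2 := (hiff1 _ _).mp hry1
  have hiff12 : ∀ z r, pvRootOf f2.1 z r ↔ pvRootOf p z r := by
    intro z r
    rw [hiff2 z r, hiff1 z r]
  have hlen12 : f2.1.length = p.length := by rw [hlen2, hlen1]
  have hpx_lt : f1.2 < p.length := pvRootOf_lt hWF hx hrx
  have hpy_lt : f2.2 < p.length := pvRootOf_lt hWF hy hry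
  have hrootx2 : pvIsRoot f2.1 f1.2 := by
    obtain ⟨k, hk, hr⟩ := (hiff12 x f1.2).mpr hrx
    exact hr
  have hrooty2 : pvIsRoot f2.1 f2.2 := by
    obtain ⟨k, hk, hr⟩ := (hiff12 y f2.2).mpr hry
    exact hr
  by_cases heq : f1.2 = f2.2
  · have hsame_xy : pvSame p x y := ⟨f1.2, hrx, heq ▸ hry⟩
    have hres : pvUFUnion p rank x y = (f2.1, rank) := by
      simp only [pvUFUnion, ← hf1, ← hf2, if_pos heq]
    rw [hres]
    refine ⟨hWF2, hlen12, ?_⟩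
    intro a b
    rw [pvSame_iff_of_rootiff hiff12]
    constructor
    · exact Or.inl
    · rintro (h | ⟨h1', h2'⟩ | ⟨h1', h2'⟩)
      · exact h
      · exact pvSame_trans (pvSame_trans h1' hsame_xy) (pvSame_symm h2')
      · exact pvSame_trans (pvSame_trans h1' (pvSame_symm hsame_xy)) (pvSame_symm h2')
  · have hpx2 : f1.2 < f2.1.length := by rw [hlen12]; exact hpx_lt
    have hpy2 : f2.2 < f2.1.length := by rw [hlen12]; exact hpy_lt
    have hchar : ∀ (w l : Nat), ((w = f1.2 ∧ l = f2.2) ∨ (w = f2.2 ∧ l = f1.2)) →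
        pvWF (f2.1.set l w) ∧ (f2.1.set l w).length = p.length ∧
        (∀ a b, pvSame (f2.1.set l w) a b ↔
          (pvSame p a b ∨ (pvSame p a x ∧ pvSame p b y) ∨ (pvSame p a y ∧ pvSame p b x))) := by
      intro w l hwl
      have hrw : pvIsRoot f2.1 w := by rcases hwl with ⟨rfl, _⟩ | ⟨rfl, _⟩ <;> assumption
      have hrl : pvIsRoot f2.1 l := by rcases hwl with ⟨_, rfl⟩ | ⟨_, rfl⟩ <;> assumption
      have hnewl : w ≠ l := by rcases hwl with ⟨rfl, rfl⟩ | ⟨rfl, rfl⟩ <;> omega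
      have hw2 : w < f2.1.length := by rcases hwl with ⟨rfl, _⟩ | ⟨rfl, _⟩ <;> assumption
      have hl2 : l < f2.1.length := by rcases hwl with ⟨_, rfl⟩ | ⟨_, rfl⟩ <;> assumption
      obtain ⟨hWF', hiff'⟩ := pvLink_spec f2.1 hWF2 hrw hrl hnewl hw2 hl2
      refine ⟨hWF', by simpa [hlen12] using hlen12, ?_⟩
      have hiffp : ∀ z r, pvRootOf (f2.1.set l w) z r ↔
          ((pvRootOf p z r ∧ r ≠ l) ∨ (pvRootOf p z l ∧ r = w)) := by
        intro z r
        rw [hiff' z r]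
        constructor
        · rintro (⟨h', hne'⟩ | ⟨h', rfl⟩)
          · exact Or.inl ⟨(hiff12 _ _).mp h', hne'⟩
          · exact Or.inr ⟨(hiff12 _ _).mp h', rfl⟩
        · rintro (⟨h', hne'⟩ | ⟨h', rfl⟩)
          · exact Or.inl ⟨(hiff12 _ _).mpr h', hne'⟩
          · exact Or.inr ⟨(hiff12 _ _).mpr h', rfl⟩
      exact pvSame_link_char hWF x y hrx hry hwl hnewl hiffp
    by_cases hr1 : rank.getD f1.2 0 < rank.getD f2.2 0
    · have hres : pvUFUnion p rank x y = (f2.1.set f1.2 f2.2, rank) := by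
        simp only [pvUFUnion, ← hf1, ← hf2, if_neg heq, if_pos hr1]
      rw [hres]
      exact hchar f2.2 f1.2 (Or.inr ⟨rfl, rfl⟩)
    · by_cases hr2 : rank.getD f2.2 0 < rank.getD f1.2 0
      · have hres : pvUFUnion p rank x y = (f2.1.set f2.2 f1.2, rank) := by
          simp only [pvUFUnion, ← hf1, ← hf2, if_neg heq, if_neg hr1, if_pos hr2]
        rw [hres]
        exact hchar f1.2 f2.2 (Or.inl ⟨rfl, rfl⟩)
      · have hres : pvUFUnion p rank x y
            = (f2.1.set f2.2 f1.2, rank.set f1.2 (rank.getD f1.2 0 + 1)) := by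
          simp only [pvUFUnion, ← hf1, ← hf2, if_neg heq, if_neg hr1, if_neg hr2]
        rw [hres]
        exact hchar f1.2 f2.2 (Or.inl ⟨rfl, rfl⟩)

def pvERel (es : List (Nat × Nat)) (a b : Nat) : Prop :=
  Relation.EqvGen (fun u v => (u, v) ∈ es) a b

theorem pvERel_refl (es : List (Nat × Nat)) (a : Nat) : pvERel es a a :=
  Relation.EqvGen.refl a

theorem pvERel_symm {es : List (Nat × Nat)} {a b : Nat} (h : pvERel es a b) : pvERel es b a :=
  Relation.EqvGen.symm a b h

theorem pvERel_trans {es : List (Nat × Nat)} {a b c : Nat} (h1 : pvERel es a b)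
    (h2 : pvERel es b c) : pvERel es a c :=
  Relation.EqvGen.trans a b c h1 h2

theorem pvERel_nil {a b : Nat} : pvERel [] a b ↔ a = b := by
  constructor
  · intro h
    induction h with
    | rel x y hxy => simp at hxy
    | refl x => rfl
    | symm x y _ ih => omega
    | trans x y z _ _ ih1 ih2 => omega
  · rintro rfl
    exact pvERel_refl [] a

theorem pvERel_mono {es es' : List (Nat × Nat)} {a b : Nat} (h : pvERel es a b) :
    pvERel (es ++ es') a b := by
  induction h with
  | rel x y hxy => exact Relation.EqvGen.rel x y (List.mem_append_left es' hxy)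
  | refl x => exact Relation.EqvGen.refl x
  | symm x y _ ih => exact Relation.EqvGen.symm x y ih
  | trans x y z _ _ ih1 ih2 => exact Relation.EqvGen.trans x y z ih1 ih2

theorem pvERel_append_single (es : List (Nat × Nat)) (i j a b : Nat) :
    pvERel (es ++ [(i, j)]) a b ↔
      (pvERel es a b ∨ (pvERel es a i ∧ pvERel es j b) ∨ (pvERel es a j ∧ pvERel es i b)) := by
  constructor
  · intro h
    induction h with
    | rel x y hxy =>
      rcases List.mem_append.mp hxy with hin | hin
      · exact Or.inl (Relation.EqvGen.rel x y hin)
      · simp at hin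
        obtain ⟨rfl, rfl⟩ := hin
        exact Or.inr (Or.inl ⟨pvERel_refl es x, pvERel_refl es y⟩)
    | refl x => exact Or.inl (pvERel_refl es x)
    | symm x y _ ih =>
      rcases ih with h' | ⟨h1, h2⟩ | ⟨h1, h2⟩
      · exact Or.inl (pvERel_symm h')
      · exact Or.inr (Or.inr ⟨pvERel_symm h2, pvERel_symm h1⟩)
      · exact Or.inr (Or.inl ⟨pvERel_symm h2, pvERel_symm h1⟩)
    | trans x y z _ _ ih1 ih2 =>
      rcases ih1 with h1 | ⟨h1a, h1b⟩ | ⟨h1a, h1b⟩ <;>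
        rcases ih2 with h2 | ⟨h2a, h2b⟩ | ⟨h2a, h2b⟩
      · exact Or.inl (pvERel_trans h1 h2)
      · exact Or.inr (Or.inl ⟨pvERel_trans h1 h2a, h2b⟩)
      · exact Or.inr (Or.inr ⟨pvERel_trans h1 h2a, h2b⟩)
      · exact Or.inr (Or.inl ⟨h1a, pvERel_trans h1b h2⟩)
      · exact Or.inr (Or.inl ⟨h1a, h2b⟩)
      · exact Or.inl (pvERel_trans h1a h2b)
      · exact Or.inr (Or.inr ⟨h1a, pvERel_trans h1b h2⟩)
      · exact Or.inl (pvERel_trans h1a h2b)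
      · exact Or.inr (Or.inr ⟨h1a, h2b⟩)
  · rintro (h | ⟨h1, h2⟩ | ⟨h1, h2⟩)
    · exact pvERel_mono h
    · exact pvERel_trans (pvERel_mono h1)
        (pvERel_trans (Relation.EqvGen.rel i j (by simp)) (pvERel_mono h2))
    · exact pvERel_trans (pvERel_mono h1)
        (pvERel_trans (pvERel_symm (Relation.EqvGen.rel i j (by simp))) (pvERel_mono h2))

-- processing a list of edges with union, starting from a state whose partition is pvERel es0
theorem pvUnionFold_spec (n : Nat) :
    ∀ (es es0 : List (Nat × Nat)) (p rank : List Nat), pvWF p → p.length = n →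
    (∀ e ∈ es, e.1 < n ∧ e.2 < n) →
    (∀ a b, a < n → b < n → (pvSame p a b ↔ pvERel es0 a b)) →
    pvWF (es.foldl (fun st e => pvUFUnion st.1 st.2 e.1 e.2) (p, rank)).1 ∧
    (es.foldl (fun st e => pvUFUnion st.1 st.2 e.1 e.2) (p, rank)).1.length = n ∧
    (∀ a b, a < n → b < n →
      (pvSame (es.foldl (fun st e => pvUFUnion st.1 st.2 e.1 e.2) (p, rank)).1 a b ↔
        pvERel (es0 ++ es) a b)) := by
  intro es
  induction es with
  | nil =>
    intro es0 p rank hWF hlen _ hinv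
    simpa using ⟨hWF, hlen, hinv⟩
  | cons e es ih =>
    intro es0 p rank hWF hlen hes hinv
    have he1 : e.1 < n := (hes e (by simp)).1
    have he2 : e.2 < n := (hes e (by simp)).2
    obtain ⟨hWFu, hlenu, hsu⟩ := pvUnion_spec p rank e.1 e.2 hWF
      (by rw [hlen]; exact he1) (by rw [hlen]; exact he2)
    have hinv' : ∀ a b, a < n → b < n →
        (pvSame (pvUFUnion p rank e.1 e.2).1 a b ↔ pvERel (es0 ++ [e]) a b) := by
      intro a b ha hb
      have h1 := hinv a b ha hb
      have h2 := hinv a e.1 ha he1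
      have h3 := hinv b e.2 hb he2
      have h4 := hinv a e.2 ha he2
      have h5 := hinv b e.1 hb he1
      rw [hsu a b]
      have : (e.1, e.2) = e := rfl
      rw [← this, pvERel_append_single]
      constructor
      · rintro (h | ⟨x1, x2⟩ | ⟨x1, x2⟩)
        · exact Or.inl (h1.mp h)
        · exact Or.inr (Or.inl ⟨h2.mp x1, pvERel_symm (h3.mp x2)⟩)
        · exact Or.inr (Or.inr ⟨h4.mp x1, pvERel_symm (h5.mp x2)⟩)
      · rintro (h | ⟨x1, x2⟩ | ⟨x1, x2⟩)
        · exact Or.inl (h1.mpr h)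
        · exact Or.inr (Or.inl ⟨h2.mpr x1, h3.mpr (pvERel_symm x2)⟩)
        · exact Or.inr (Or.inr ⟨h4.mpr x1, h5.mpr (pvERel_symm x2)⟩)
    have hres := ih (es0 ++ [e]) (pvUFUnion p rank e.1 e.2).1 (pvUFUnion p rank e.1 e.2).2
      hWFu (by rw [hlenu, hlen]) (fun e' he' => hes e' (by simp [he'])) hinv'
    simp only [List.foldl_cons]
    refine ⟨hres.1, hres.2.1, ?_⟩
    intro a b ha hb
    have := hres.2.2 a b ha hb
    rwa [List.append_assoc, List.singleton_append] at this

def pvRootD (p : List Nat) (x : Nat) : Nat := pvIter p p.length x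

theorem pvRootD_rootOf {p : List Nat} (hWF : pvWF p) {x : Nat} (hx : x < p.length) :
    pvRootOf p x (pvRootD p x) := by
  obtain ⟨d, hd⟩ := pvDepth_exists hWF x
  have hdle : d ≤ p.length := pvDepth_le_length hWF hx hd
  have : pvRootD p x = pvIter p d x := by
    unfold pvRootD
    rw [show p.length = d + (p.length - d) by omega, pvIter_add,
      pvIter_fix p _ _ hd.1]
  rw [this]
  exact pvDepth_rootOf hd

theorem pvStep_range (n x : Nat) : pvStep (List.range n) x = if x < n then x else 0 := by
  unfold pvStep List.getD
  by_cases h : x < n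
  · simp [List.getElem?_range, h]
  · have hnone : (List.range n)[x]? = none := List.getElem?_eq_none (by simpa using h)
    simp [hnone, h]

theorem pvWF_range (n : Nat) : pvWF (List.range n) := by
  constructor
  · intro x hx
    simp only [List.length_range] at hx ⊢
    have hs := pvStep_range n x
    unfold pvStep at hs
    rw [hs, if_pos hx]
    exact hx
  · intro x
    by_cases h : x < n
    · exact ⟨0, by unfold pvIsRoot; rw [show pvIter (List.range n) 0 x = x from rfl, pvStep_range, if_pos h]⟩
    · refine ⟨1, ?_⟩
      unfold pvIsRoot
      have h1 : pvIter (List.range n) 1 x = pvStep (List.range n) x := rfl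
      have hs : pvStep (List.range n) x = 0 := by rw [pvStep_range, if_neg h]
      rw [h1, hs, pvStep_range]
      by_cases h0 : 0 < n <;> simp [h0]

theorem pvSame_range {n a b : Nat} (ha : a < n) (hb : b < n) :
    pvSame (List.range n) a b ↔ a = b := by
  have hra : pvRootOf (List.range n) a a :=
    pvRootOf_self (by unfold pvIsRoot; rw [pvStep_range, if_pos ha])
  have hrb : pvRootOf (List.range n) b b :=
    pvRootOf_self (by unfold pvIsRoot; rw [pvStep_range, if_pos hb])
  exact pvSame_iff_root_eq hra hrb

theorem pvClusterFold (pf : List Nat) (hWFf : pvWF pf) (n : Nat) (hlenf : pf.length = n) :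
    ∀ (idxs : List Nat) (p : List Nat) (d0 : PySem.Dict Nat (List Nat)),
    pvWF p → p.length = n → (∀ z r, pvRootOf p z r ↔ pvRootOf pf z r) → (∀ i ∈ idxs, i < n) →
    (idxs.foldl (fun (acc : List Nat × PySem.Dict Nat (List Nat)) idx =>
        let f := pvUFFind acc.1.length acc.1 idx
        (f.1, acc.2.modify f.2 [] (· ++ [idx]))) (p, d0)).2
      = idxs.foldl (fun d idx => d.modify (pvRootD pf idx) [] (· ++ [idx])) d0 := by
  intro idxs
  induction idxs with
  | nil => intro p d0 _ _ _ _; rfl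
  | cons i idxs ih =>
    intro p d0 hWF hplen hiffpf hmem
    have hi : i < p.length := by rw [hplen]; exact hmem i (by simp)
    have hex : ∃ d, d ≤ p.length ∧ pvDepth p i d := by
      obtain ⟨d, hd⟩ := pvDepth_exists hWF i
      exact ⟨d, pvDepth_le_length hWF hi hd, hd⟩
    obtain ⟨hWF', hlen', hroot', hiff'⟩ := pvFind_spec p.length p i hWF hi hex
    have hkey : (pvUFFind p.length p i).2 = pvRootD pf i := by
      have h1 : pvRootOf pf i (pvUFFind p.length p i).2 := (hiffpf _ _).mp hroot'
      have h2 : pvRootOf pf i (pvRootD pf i) := pvRootD_rootOf hWFf (by rw [hlenf]; exact hmem i (by simp))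
      exact pvRootOf_unique h1 h2
    simp only [List.foldl_cons]
    rw [hkey]
    exact ih (pvUFFind p.length p i).1 _ hWF' (by rw [hlen', hplen])
      (fun z r => (hiff' z r).trans (hiffpf z r)) (fun j hj => hmem j (by simp [hj]))

def pvPairOK (hashes : List (Option Int)) (md : Int) (i j : Nat) : Option (Nat × Nat) :=
  match hashes.getD i none, hashes.getD j none with
  | some a, some b => if (pvHamming a b : Int) ≤ md then some (i, j) else none
  | _, _ => none

def pvEdgeList (hashes : List (Option Int)) (md : Int) : List (Nat × Nat) :=
  (List.range hashes.length).flatMap (fun i =>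
    (List.range' (i+1) (hashes.length - (i+1))).filterMap (fun j => pvPairOK hashes md i j))

theorem pvFoldInner_eq {σ : Type} (hashes : List (Option Int)) (md : Int) (i : Nat)
    (f : σ → (Nat × Nat) → σ) :
    ∀ (jl : List Nat) (st : σ),
    (match hashes.getD i none with
     | none => st
     | some hi => jl.foldl (fun st j =>
         match hashes.getD j none with
         | none => st
         | some hj => if (pvHamming hi hj : Int) ≤ md then f st (i, j) else st) st)
    = (jl.filterMap (fun j => pvPairOK hashes md i j)).foldl f st := by
  intro jl
  cases hhi : hashes.getD i none with
  | none =>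
    intro st
    have : jl.filterMap (fun j => pvPairOK hashes md i j) = [] := by
      apply List.filterMap_eq_nil_iff.mpr
      intro j _
      have hhi' : hashes[i]?.getD none = none := by simpa [List.getD] using hhi
      simp [pvPairOK, List.getD, hhi']
    rw [this]
    rfl
  | some hi =>
    have hhi' : hashes[i]?.getD none = some hi := by simpa [List.getD] using hhi
    induction jl with
    | nil => intro st; rfl
    | cons j jl ihj =>
      intro st
      simp only [List.foldl_cons, List.filterMap_cons]
      cases hhj : hashes.getD j none with
      | none =>
        have hhj' : hashes[j]?.getD none = none := by simpa [List.getD] using hhj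
        rw [show pvPairOK hashes md i j = none from by simp [pvPairOK, List.getD, hhi', hhj']]
        simpa using ihj st
      | some hj =>
        have hhj' : hashes[j]?.getD none = some hj := by simpa [List.getD] using hhj
        by_cases hc : (pvHamming hi hj : Int) ≤ md
        · rw [show pvPairOK hashes md i j = some (i, j) from by simp [pvPairOK, List.getD, hhi', hhj', hc]]
          simp only [List.foldl_cons]
          simpa [hc] using ihj (f st (i, j))
        · rw [show pvPairOK hashes md i j = none from by simp [pvPairOK, List.getD, hhi', hhj', hc]]
          simpa [hc] using ihj st

theorem pvFoldA_eq {σ : Type} (hashes : List (Option Int)) (md : Int)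
    (f : σ → (Nat × Nat) → σ) (init : σ) :
    (List.range hashes.length).foldl (fun st i =>
      match hashes.getD i none with
      | none => st
      | some hi =>
        (List.range' (i+1) (hashes.length - (i+1))).foldl (fun st j =>
          match hashes.getD j none with
          | none => st
          | some hj =>
            if (pvHamming hi hj : Int) ≤ md then f st (i, j) else st) st) init
    = (pvEdgeList hashes md).foldl f init := by
  unfold pvEdgeList
  rw [List.foldl_flatMap]
  have : (fun (st : σ) (i : Nat) =>
      match hashes.getD i none with
      | none => st
      | some hi =>
        (List.range' (i+1) (hashes.length - (i+1))).foldl (fun st j =>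
          match hashes.getD j none with
          | none => st
          | some hj =>
            if (pvHamming hi hj : Int) ≤ md then f st (i, j) else st) st)
    = (fun (st : σ) (i : Nat) =>
        ((List.range' (i+1) (hashes.length - (i+1))).filterMap
          (fun j => pvPairOK hashes md i j)).foldl f st) := by
    funext st i
    exact pvFoldInner_eq hashes md i f _ st
  rw [this]

theorem pvFoldAppend_eq_flatMap {α β : Type} (g : α → List β) :
    ∀ (l : List α) (acc : List β),
    l.foldl (fun acc x => acc ++ g x) acc = acc ++ l.flatMap g := by
  intro l
  induction l with
  | nil => intro acc; simp
  | cons x l ih => intro acc; simp [ih, List.append_assoc]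

theorem pvInnerB_eq (hashes : List (Option Int)) (md : Int) (i : Nat) :
    ∀ (jl : List Nat) (acc : List (Nat × Nat)),
    (match hashes.getD i none with
     | none => acc
     | some hi => jl.foldl (fun acc j =>
         match hashes.getD j none with
         | none => acc
         | some hj => if (pvHamming hi hj : Int) ≤ md then acc ++ [(i, j)] else acc) acc)
    = acc ++ jl.filterMap (fun j => pvPairOK hashes md i j) := by
  intro jl acc
  rw [pvFoldInner_eq hashes md i (fun acc e => acc ++ [e]) jl acc]
  generalize jl.filterMap (fun j => pvPairOK hashes md i j) = es
  induction es generalizing acc with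
  | nil => simp
  | cons e es ih => simp [ih, List.append_assoc]

theorem pvEdges_eq (hashes : List (Option Int)) (md : Int) :
    pvEdges hashes md = pvEdgeList hashes md := by
  unfold pvEdges pvEdgeList
  rw [show (List.range hashes.length).flatMap (fun i =>
      (List.range' (i+1) (hashes.length - (i+1))).filterMap (fun j => pvPairOK hashes md i j))
    = [] ++ (List.range hashes.length).flatMap (fun i =>
      (List.range' (i+1) (hashes.length - (i+1))).filterMap (fun j => pvPairOK hashes md i j)) from (List.nil_append _).symm]
  rw [← pvFoldAppend_eq_flatMap]
  have : (fun (acc : List (Nat × Nat)) (i : Nat) =>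
      match hashes.getD i none with
      | none => acc
      | some hi =>
        (List.range' (i+1) (hashes.length - (i+1))).foldl (fun acc j =>
          match hashes.getD j none with
          | none => acc
          | some hj =>
            if (pvHamming hi hj : Int) ≤ md then acc ++ [(i, j)] else acc) acc)
    = (fun (acc : List (Nat × Nat)) (i : Nat) =>
        acc ++ (List.range' (i+1) (hashes.length - (i+1))).filterMap
          (fun j => pvPairOK hashes md i j)) := by
    funext acc i
    exact pvInnerB_eq hashes md i _ acc
  rw [this]

theorem pvEdgeList_mem {hashes : List (Option Int)} {md : Int} {e : Nat × Nat}
    (he : e ∈ pvEdgeList hashes md) : e.1 < hashes.length ∧ e.2 < hashes.length := by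
  unfold pvEdgeList at he
  obtain ⟨i, hi, he'⟩ := List.mem_flatMap.mp he
  obtain ⟨j, hj, hok⟩ := List.mem_filterMap.mp he'
  have hij : e = (i, j) := by
    unfold pvPairOK at hok
    rcases h1 : hashes.getD i none with _ | a <;> rw [h1] at hok
    · simp at hok
    · rcases h2 : hashes.getD j none with _ | b <;> rw [h2] at hok
      · simp at hok
      · have hok' : (if (pvHamming a b : Int) ≤ md then some (i, j) else none) = some e := hok
        by_cases hc : (pvHamming a b : Int) ≤ md
        · rw [if_pos hc] at hok'
          exact (Option.some.inj hok').symm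
        · rw [if_neg hc] at hok'
          exact absurd hok' (by simp)
  have hin : i < hashes.length := List.mem_range.mp hi
  have hjn : j < hashes.length := by
    have := List.mem_range'_1.mp hj
    omega
  rw [hij]
  exact ⟨hin, hjn⟩

def pvPassStep (st : List Nat × Bool) (e : Nat × Nat) : List Nat × Bool :=
  let li := st.1.getD e.1 0
  let lj := st.1.getD e.2 0
  if li < lj then (st.1.set e.2 li, true)
  else if lj < li then (st.1.set e.1 lj, true)
  else st

theorem pvPass_eq (es : List (Nat × Nat)) (l : List Nat) :
    pvPass es l = es.foldl pvPassStep (l, false) := rfl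

theorem pvPassStep_cases (st : List Nat × Bool) (e : Nat × Nat) :
    (¬ st.1.getD e.1 0 < st.1.getD e.2 0 ∧ ¬ st.1.getD e.2 0 < st.1.getD e.1 0 ∧ pvPassStep st e = st)
    ∨ (st.1.getD e.1 0 < st.1.getD e.2 0 ∧ pvPassStep st e = (st.1.set e.2 (st.1.getD e.1 0), true))
    ∨ (st.1.getD e.2 0 < st.1.getD e.1 0 ∧ pvPassStep st e = (st.1.set e.1 (st.1.getD e.2 0), true)) := by
  unfold pvPassStep
  by_cases h1 : st.1.getD e.1 0 < st.1.getD e.2 0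
  · exact Or.inr (Or.inl ⟨h1, by rw [if_pos h1]⟩)
  · by_cases h2 : st.1.getD e.2 0 < st.1.getD e.1 0
    · exact Or.inr (Or.inr ⟨h2, by rw [if_neg h1, if_pos h2]⟩)
    · exact Or.inl ⟨h1, h2, by rw [if_neg h1, if_neg h2]⟩

theorem pvGetD_pos_lt {l : List Nat} {i : Nat} (h : 0 < l.getD i 0) : i < l.length := by
  by_contra hge
  push_neg at hge
  have : l[i]? = none := List.getElem?_eq_none hge
  simp [List.getD, this] at h

theorem pvGetD_eq_getElem {l : List Nat} {i : Nat} (h : i < l.length) : l.getD i 0 = l[i] := by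
  unfold List.getD
  rw [List.getElem?_eq_getElem h]
  rfl

theorem pvSum_set_lt {l : List Nat} {i v : Nat} (hi : i < l.length) (hv : v < l.getD i 0) :
    (l.set i v).sum < l.sum := by
  have h1 := List.sum_set l i v
  have h2 := List.sum_set l i l[i]
  rw [List.set_getElem_self] at h2
  rw [if_pos hi] at h1 h2
  rw [pvGetD_eq_getElem hi] at hv
  omega

theorem pvPassFold_len : ∀ (es : List (Nat × Nat)) (st : List Nat × Bool),
    ((es.foldl pvPassStep st).1).length = st.1.length := by
  intro es
  induction es with
  | nil => intro st; rfl
  | cons e es ih =>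
    intro st
    simp only [List.foldl_cons]
    rcases pvPassStep_cases st e with ⟨_, _, heq⟩ | ⟨_, heq⟩ | ⟨_, heq⟩ <;>
      rw [heq] <;> simp [ih]

theorem pvPassFold_true : ∀ (es : List (Nat × Nat)) (l : List Nat),
    (es.foldl pvPassStep (l, true)).2 = true := by
  intro es
  induction es with
  | nil => intro l; rfl
  | cons e es ih =>
    intro l
    simp only [List.foldl_cons]
    rcases pvPassStep_cases (l, true) e with ⟨_, _, heq⟩ | ⟨_, heq⟩ | ⟨_, heq⟩ <;> rw [heq] <;>
      exact ih _

theorem pvPassFold_progress : ∀ (es : List (Nat × Nat)) (st : List Nat × Bool),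
    (es.foldl pvPassStep st = st)
    ∨ ((es.foldl pvPassStep st).2 = true ∧ (es.foldl pvPassStep st).1.sum < st.1.sum) := by
  intro es
  induction es with
  | nil => intro st; exact Or.inl rfl
  | cons e es ih =>
    intro st
    simp only [List.foldl_cons]
    rcases pvPassStep_cases st e with ⟨_, _, heq⟩ | ⟨hlt, heq⟩ | ⟨hlt, heq⟩
    · rw [heq]; exact ih st
    · rw [heq]
      have hidx : e.2 < st.1.length := pvGetD_pos_lt (by omega)
      have hdec : (st.1.set e.2 (st.1.getD e.1 0)).sum < st.1.sum := pvSum_set_lt hidx hlt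
      rcases ih (st.1.set e.2 (st.1.getD e.1 0), true) with h | ⟨h1, h2⟩
      · rw [h]; exact Or.inr ⟨rfl, hdec⟩
      · have h2' : (List.foldl pvPassStep (st.1.set e.2 (st.1.getD e.1 0), true) es).1.sum
            < (st.1.set e.2 (st.1.getD e.1 0)).sum := h2
        exact Or.inr ⟨h1, by omega⟩
    · rw [heq]
      have hidx : e.1 < st.1.length := pvGetD_pos_lt (by omega)
      have hdec : (st.1.set e.1 (st.1.getD e.2 0)).sum < st.1.sum := pvSum_set_lt hidx hlt
      rcases ih (st.1.set e.1 (st.1.getD e.2 0), true) with h | ⟨h1, h2⟩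
      · rw [h]; exact Or.inr ⟨rfl, hdec⟩
      · have h2' : (List.foldl pvPassStep (st.1.set e.1 (st.1.getD e.2 0), true) es).1.sum
            < (st.1.set e.1 (st.1.getD e.2 0)).sum := h2
        exact Or.inr ⟨h1, by omega⟩

theorem pvPassFold_no_change : ∀ (es : List (Nat × Nat)) (l : List Nat),
    (es.foldl pvPassStep (l, false)).2 = false →
    (es.foldl pvPassStep (l, false)).1 = l ∧ ∀ e ∈ es, l.getD e.1 0 = l.getD e.2 0 := by
  intro es
  induction es with
  | nil => intro l _; exact ⟨rfl, by simp⟩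
  | cons e es ih =>
    intro l hfalse
    simp only [List.foldl_cons] at hfalse ⊢
    rcases pvPassStep_cases (l, false) e with ⟨h1, h2, heq⟩ | ⟨_, heq⟩ | ⟨_, heq⟩
    · rw [heq] at hfalse ⊢
      obtain ⟨hl, hes⟩ := ih l hfalse
      refine ⟨hl, ?_⟩
      intro e' he'
      rcases List.mem_cons.mp he' with rfl | he''
      · simp only at h1 h2
        omega
      · exact hes e' he''
    · rw [heq] at hfalse
      rw [pvPassFold_true es _] at hfalse
      exact absurd hfalse (by simp)
    · rw [heq] at hfalse
      rw [pvPassFold_true es _] at hfalse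
      exact absurd hfalse (by simp)

theorem pvPassFold_inv (E : List (Nat × Nat)) (n : Nat)
    (hEn : ∀ e ∈ E, e.1 < n ∧ e.2 < n) :
    ∀ (es : List (Nat × Nat)) (st : List Nat × Bool), (∀ e ∈ es, e ∈ E) →
    st.1.length = n → (∀ x, x < n → pvERel E x (st.1.getD x 0)) →
    (∀ x, x < n → pvERel E x ((es.foldl pvPassStep st).1.getD x 0)) := by
  intro es
  induction es with
  | nil => intro st _ _ hinv; exact hinv
  | cons e es ih =>
    intro st hsub hlen hinv
    simp only [List.foldl_cons]
    have heE : e ∈ E := hsub e (by simp)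
    have he1 : e.1 < n := (hEn e heE).1
    have he2 : e.2 < n := (hEn e heE).2
    have hrel : pvERel E e.1 e.2 := Relation.EqvGen.rel e.1 e.2 heE
    rcases pvPassStep_cases st e with ⟨_, _, heq⟩ | ⟨hlt, heq⟩ | ⟨hlt, heq⟩
    · rw [heq]
      exact ih st (fun e' he' => hsub e' (by simp [he'])) hlen hinv
    · rw [heq]
      apply ih _ (fun e' he' => hsub e' (by simp [he'])) (by simpa using hlen)
      intro x hx
      have hs := pvStep_set st.1 e.2 (st.1.getD e.1 0) x
      unfold pvStep at hs
      rw [hs]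
      by_cases hcase : x = e.2 ∧ e.2 < st.1.length
      · rw [if_pos hcase]
        rw [hcase.1]
        exact pvERel_trans (pvERel_symm hrel) (hinv e.1 he1)
      · rw [if_neg hcase]
        exact hinv x hx
    · rw [heq]
      apply ih _ (fun e' he' => hsub e' (by simp [he'])) (by simpa using hlen)
      intro x hx
      have hs := pvStep_set st.1 e.1 (st.1.getD e.2 0) x
      unfold pvStep at hs
      rw [hs]
      by_cases hcase : x = e.1 ∧ e.1 < st.1.length
      · rw [if_pos hcase]
        rw [hcase.1]
        exact pvERel_trans hrel (hinv e.2 he2)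
      · rw [if_neg hcase]
        exact hinv x hx

theorem pvLoop_spec (E : List (Nat × Nat)) (n : Nat)
    (hEn : ∀ e ∈ E, e.1 < n ∧ e.2 < n) :
    ∀ (fuel : Nat) (l : List Nat), l.length = n →
    (∀ x, x < n → pvERel E x (l.getD x 0)) → l.sum < fuel →
    (pvLoop fuel E l).length = n ∧
    (∀ x, x < n → pvERel E x ((pvLoop fuel E l).getD x 0)) ∧
    (∀ e ∈ E, (pvLoop fuel E l).getD e.1 0 = (pvLoop fuel E l).getD e.2 0) := by
  intro fuel
  induction fuel with
  | zero => intro l _ _ h; omega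
  | succ fuel ih =>
    intro l hlen hinv hsum
    have hloop : pvLoop (fuel+1) E l
        = (if (pvPass E l).2 then pvLoop fuel E (pvPass E l).1 else (pvPass E l).1) := rfl
    rcases pvPassFold_progress E (l, false) with hsame | ⟨htrue, hdec⟩
    · have h2 : (pvPass E l).2 = false := by rw [pvPass_eq, hsame]
      have h1 : (pvPass E l).1 = l := by rw [pvPass_eq, hsame]
      rw [hloop, h2]
      simp only [Bool.false_eq_true, if_false, h1]
      obtain ⟨_, hes⟩ := pvPassFold_no_change E l (by rw [← pvPass_eq]; exact h2)
      exact ⟨hlen, hinv, fun e he => hes e he⟩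
    · have h2 : (pvPass E l).2 = true := by rw [pvPass_eq]; exact htrue
      rw [hloop, h2]
      simp only [if_true]
      apply ih
      · rw [pvPass_eq, pvPassFold_len]; exact hlen
      · exact pvPassFold_inv E n hEn E (l, false) (fun e he => he) hlen hinv
      · have hdec' : (E.foldl pvPassStep (l, false)).1.sum < l.sum := hdec
        rw [pvPass_eq]
        omega

theorem pvSum_range_le (n : Nat) : (List.range n).sum ≤ n * n := by
  induction n with
  | zero => simp
  | succ n ih =>
    rw [List.range_succ, List.sum_append]
    simp only [List.sum_cons, List.sum_nil]
    nlinarith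

def pvDictGroup (n : Nat) (key : Nat → Nat) : PySem.Dict Nat (List Nat) :=
  (List.range n).foldl (fun d idx => d.modify (key idx) [] (· ++ [idx])) PySem.Dict.empty

def pvReps (n : Nat) (key : Nat → Nat) : List Nat :=
  (List.range n).filter (fun r => (List.range r).all (fun s => !(key s == key r)))

def pvFiber (n : Nat) (key : Nat → Nat) (r : Nat) : List Nat :=
  (List.range n).filter (fun i => key i == key r)

theorem pvDictGroup_keys (n : Nat) (key : Nat → Nat) :
    (pvDictGroup n key).keys = PySem.Set.ofList ((List.range n).map key) := by
  unfold pvDictGroup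
  rw [PySem.Dict.keys_foldl_modify_key (List.range n) key [] (fun _ x => (· ++ [x]))
    PySem.Dict.empty]
  rw [PySem.Dict.keys_empty, PySem.Set.ofList_eq_foldl]
  rfl

theorem pvDictGroup_nodup (n : Nat) (key : Nat → Nat) : (pvDictGroup n key).keys.Nodup := by
  unfold pvDictGroup
  exact PySem.Dict.nodup_keys_foldl_modify_key (List.range n) key [] (fun _ x => (· ++ [x]))
    PySem.Dict.empty PySem.Dict.nodup_keys_empty

theorem pvDictGroup_getD (n : Nat) (key : Nat → Nat) (c : Nat) :
    (pvDictGroup n key).getD c [] = (List.range n).filter (fun i => key i == c) := by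
  unfold pvDictGroup
  rw [show (List.range n).foldl (fun d idx => d.modify (key idx) [] (· ++ [idx])) PySem.Dict.empty
      = ((List.range n).map (fun i => (key i, i))).foldl
          (fun d p => d.modify p.1 [] (· ++ [p.2])) PySem.Dict.empty from by
    rw [List.foldl_map]]
  rw [PySem.Dict.getD_foldl_modify_append]
  simp [List.filter_map, Function.comp_def]

theorem pvSet_ofList_append_singleton {α : Type} [BEq α] (l : List α) (x : α) :
    PySem.Set.ofList (l ++ [x]) = PySem.Set.add (PySem.Set.ofList l) x := by
  rw [PySem.Set.ofList_eq_foldl, PySem.Set.ofList_eq_foldl, List.foldl_append]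
  rfl

theorem pvSet_ofList_map_range (n : Nat) (key : Nat → Nat) :
    PySem.Set.ofList ((List.range n).map key) = (pvReps n key).map key := by
  induction n with
  | zero => rfl
  | succ n ih =>
    rw [List.range_succ, List.map_append, show List.map key [n] = [key n] from rfl,
      pvSet_ofList_append_singleton]
    have hreps : pvReps (n+1) key = pvReps n key
        ++ (if (List.range n).all (fun s => !(key s == key n)) then [n] else []) := by
      unfold pvReps
      rw [List.range_succ, List.filter_append, List.filter_singleton]
      cases h : (List.range n).all (fun s => !(key s == key n)) <;> simp [h]
    by_cases hmem : key n ∈ (List.range n).map key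
    · have hcontains : PySem.Set.contains (PySem.Set.ofList ((List.range n).map key)) (key n) = true := by
        unfold PySem.Set.contains
        rw [List.contains_iff_exists_mem_beq]
        exact ⟨key n, (PySem.Set.mem_ofList _ _).mpr hmem, BEq.rfl⟩
      have hadd : PySem.Set.add (PySem.Set.ofList ((List.range n).map key)) (key n)
          = PySem.Set.ofList ((List.range n).map key) := by
        unfold PySem.Set.add
        rw [if_pos hcontains]
      have hpred : ((List.range n).all (fun s => !(key s == key n))) = false := by
        obtain ⟨s, hs, hks⟩ := List.mem_map.mp hmem
        apply List.all_eq_false.mpr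
        exact ⟨s, hs, by simp [hks]⟩
      rw [hadd, hreps, hpred]
      simp [ih]
    · have hcontains : PySem.Set.contains (PySem.Set.ofList ((List.range n).map key)) (key n) = false := by
        unfold PySem.Set.contains
        rw [← Bool.not_eq_true, List.contains_iff_exists_mem_beq]
        push_neg
        intro a ha
        rw [PySem.Set.mem_ofList] at ha
        intro hbeq
        rw [← eq_of_beq hbeq] at ha
        exact hmem ha
      have hadd : PySem.Set.add (PySem.Set.ofList ((List.range n).map key)) (key n)
          = PySem.Set.ofList ((List.range n).map key) ++ [key n] := by
        unfold PySem.Set.add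
        rw [hcontains]
        simp
      have hpred : ((List.range n).all (fun s => !(key s == key n))) = true := by
        apply List.all_eq_true.mpr
        intro s hs
        simp only [Bool.not_eq_eq_eq_not, Bool.not_true, beq_eq_false_iff_ne]
        intro hks
        exact hmem (List.mem_map.mpr ⟨s, hs, hks⟩)
      rw [hadd, hreps, hpred, List.map_append]
      simp [ih]

theorem pvDictGroup_values (n : Nat) (key : Nat → Nat) :
    (pvDictGroup n key).values = (pvReps n key).map (pvFiber n key) := by
  rw [PySem.Dict.values_eq_map_keys _ (pvDictGroup_nodup n key) []]
  rw [pvDictGroup_keys, pvSet_ofList_map_range, List.map_map]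
  apply List.map_congr_left
  intro r _
  simp only [Function.comp_apply]
  rw [pvDictGroup_getD]
  rfl

theorem pvReps_mem {n : Nat} {key : Nat → Nat} {r : Nat} :
    r ∈ pvReps n key ↔ r < n ∧ ∀ s, s < r → key s ≠ key r := by
  unfold pvReps
  rw [List.mem_filter, List.mem_range, List.all_eq_true]
  constructor
  · rintro ⟨h1, h2⟩
    refine ⟨h1, ?_⟩
    intro s hs
    have := h2 s (List.mem_range.mpr hs)
    simpa using this
  · rintro ⟨h1, h2⟩
    refine ⟨h1, ?_⟩
    intro s hs
    simpa using h2 s (List.mem_range.mp hs)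

theorem pvFilter_range_getD_zero {p : Nat → Bool} {n r : Nat} (hr : r < n) (hpr : p r = true)
    (hlt : ∀ s, s < r → p s = false) :
    ((List.range n).filter p).getD 0 0 = r := by
  rw [show n = r + (n - r) by omega, List.range_add, List.filter_append]
  have h1 : (List.range r).filter p = [] := by
    apply List.filter_eq_nil_iff.mpr
    intro s hs
    rw [hlt s (List.mem_range.mp hs)]
    simp
  rw [h1, List.nil_append]
  rw [show n - r = (n - r - 1) + 1 by omega, List.range_succ_eq_map]
  simp only [List.map_cons, Nat.add_zero, List.filter_cons]
  rw [hpr]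
  rfl

theorem pvRepsFibers_congr (n : Nat) (k1 k2 : Nat → Nat)
    (hfib : ∀ a b, a < n → b < n → (k1 a = k1 b ↔ k2 a = k2 b)) :
    pvReps n k1 = pvReps n k2 ∧ ∀ r, r < n → pvFiber n k1 r = pvFiber n k2 r := by
  constructor
  · unfold pvReps
    apply List.filter_congr
    intro r hr
    have hrn : r < n := List.mem_range.mp hr
    rw [Bool.eq_iff_iff, List.all_eq_true, List.all_eq_true]
    constructor
    · intro h s hs
      have hsn : s < n := by have := List.mem_range.mp hs; omega
      have := h s hs
      simp only [Bool.not_eq_eq_eq_not, Bool.not_true, beq_eq_false_iff_ne] at this ⊢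
      intro hk
      exact this ((hfib s r hsn hrn).mpr hk)
    · intro h s hs
      have hsn : s < n := by have := List.mem_range.mp hs; omega
      have := h s hs
      simp only [Bool.not_eq_eq_eq_not, Bool.not_true, beq_eq_false_iff_ne] at this ⊢
      intro hk
      exact this ((hfib s r hsn hrn).mp hk)
  · intro r hrn
    unfold pvFiber
    apply List.filter_congr
    intro i hi
    have hin : i < n := List.mem_range.mp hi
    rw [Bool.eq_iff_iff, beq_iff_eq, beq_iff_eq]
    exact hfib i r hin hrn

-- the tail of A's clusters(): sort each value, pair with head, sort by head, project
def pvATail2 (d : PySem.Dict Nat (List Nat)) : List (List Int) :=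
  (PySem.List.sorted
    (d.values.map (fun ind =>
      (PySem.List.pyGetD (PySem.List.sorted ind (fun x => x)) 0 0,
        PySem.List.sorted ind (fun x => x))))
    (fun e => e.1)).map (fun e => e.2.map (fun k => (k : Int)))

theorem pvATail2_canon (n : Nat) (key : Nat → Nat) :
    pvATail2 (pvDictGroup n key)
      = (pvReps n key).map (fun r => (pvFiber n key r).map (fun k => (k : Int))) := by
  unfold pvATail2
  rw [pvDictGroup_values]
  rw [List.map_map]
  have hmap : (pvReps n key).map ((fun ind =>
      (PySem.List.pyGetD (PySem.List.sorted ind (fun x => x)) 0 0,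
        PySem.List.sorted ind (fun x => x))) ∘ pvFiber n key)
      = (pvReps n key).map (fun r => (r, pvFiber n key r)) := by
    apply List.map_congr_left
    intro r hr
    obtain ⟨hrn, hmin⟩ := pvReps_mem.mp hr
    have hpair : (pvFiber n key r).Pairwise (· < ·) :=
      List.Pairwise.filter _ List.pairwise_lt_range
    have hsorted : PySem.List.sorted (pvFiber n key r) (fun x => x) = pvFiber n key r :=
      PySem.List.sorted_eq_self_of_pairwise _ _ (hpair.imp le_of_lt)
    simp only [Function.comp_apply, hsorted, PySem.List.pyGetD_zero]
    have hhead : (pvFiber n key r).getD 0 0 = r := by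
      apply pvFilter_range_getD_zero hrn (by simp)
      intro s hs
      simp only [beq_eq_false_iff_ne]
      exact hmin s hs
    rw [hhead]
  rw [hmap]
  have hpairs : ((pvReps n key).map (fun r => (r, pvFiber n key r))).Pairwise
      (fun a b => a.1 ≤ b.1) := by
    rw [List.pairwise_map]
    exact (List.Pairwise.filter _ List.pairwise_lt_range).imp le_of_lt
  rw [PySem.List.sorted_eq_self_of_pairwise _ _ hpairs, List.map_map]
  rfl

theorem pvA_canon (hashes : List (Option Int)) (md : Int) (hne : hashes ≠ []) :
    ∃ key1 : Nat → Nat,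
      (∀ a b, a < hashes.length → b < hashes.length →
        (key1 a = key1 b ↔ pvERel (pvEdgeList hashes md) a b)) ∧
      cluster_indices_by_hamming_py hashes md
        = (pvReps hashes.length key1).map
            (fun r => (pvFiber hashes.length key1 r).map (fun k => (k : Int))) := by
  set n := hashes.length with hn
  set E := pvEdgeList hashes md with hE
  set stf := E.foldl (fun (st : List Nat × List Nat) e => pvUFUnion st.1 st.2 e.1 e.2)
    (List.range n, List.replicate n 0) with hstf
  have hEn : ∀ e ∈ E, e.1 < n ∧ e.2 < n := fun e he => pvEdgeList_mem he
  have hinit : ∀ a b, a < n → b < n →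
      (pvSame (List.range n) a b ↔ pvERel ([] : List (Nat × Nat)) a b) := by
    intro a b ha hb
    rw [pvSame_range ha hb, pvERel_nil]
  obtain ⟨hWFf, hlenf, hsamef⟩ := pvUnionFold_spec n E [] (List.range n)
    (List.replicate n 0) (pvWF_range n) (by simp) hEn hinit
  have hsameE : ∀ a b, a < n → b < n → (pvSame stf.1 a b ↔ pvERel E a b) := by
    intro a b ha hb
    rw [← List.nil_append E]
    exact hsamef a b ha hb
  set key1 := pvRootD stf.1 with hkey1
  refine ⟨key1, ?_, ?_⟩
  · intro a b ha hb
    rw [← hsameE a b ha hb]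
    exact (pvSame_iff_root_eq (pvRootD_rootOf hWFf (by rw [hlenf]; exact ha))
      (pvRootD_rootOf hWFf (by rw [hlenf]; exact hb))).symm
  · have hstep1 : cluster_indices_by_hamming_py hashes md
        = pvATail2 ((List.range n).foldl (fun (acc : List Nat × PySem.Dict Nat (List Nat)) idx =>
            let f := pvUFFind acc.1.length acc.1 idx
            (f.1, acc.2.modify f.2 [] (· ++ [idx])))
          (((List.range n).foldl (fun (st : List Nat × List Nat) i =>
            match hashes.getD i none with
            | none => st
            | some hi =>
              (List.range' (i+1) (n - (i+1))).foldl (fun st j =>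
                match hashes.getD j none with
                | none => st
                | some hj =>
                  if (pvHamming hi hj : Int) ≤ md then pvUFUnion st.1 st.2 i j else st) st)
            (List.range n, List.replicate n 0)).1, PySem.Dict.empty)).2 := by
      unfold cluster_indices_by_hamming_py
      rw [if_neg hne]
      rfl
    rw [hstep1]
    rw [show (List.range n).foldl (fun (st : List Nat × List Nat) i =>
            match hashes.getD i none with
            | none => st
            | some hi =>
              (List.range' (i+1) (n - (i+1))).foldl (fun st j =>
                match hashes.getD j none with
                | none => st
                | some hj =>
                  if (pvHamming hi hj : Int) ≤ md then pvUFUnion st.1 st.2 i j else st) st)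
            (List.range n, List.replicate n 0) = stf from
      pvFoldA_eq hashes md (fun st e => pvUFUnion st.1 st.2 e.1 e.2) _]
    rw [pvClusterFold stf.1 hWFf n hlenf (List.range n) stf.1 PySem.Dict.empty hWFf hlenf
      (fun z r => Iff.rfl) (fun i hi => List.mem_range.mp hi)]
    exact pvATail2_canon n key1

theorem pvB_canon (hashes : List (Option Int)) (md : Int) :
    ∃ key2 : Nat → Nat,
      (∀ a b, a < hashes.length → b < hashes.length →
        (key2 a = key2 b ↔ pvERel (pvEdgeList hashes md) a b)) ∧
      cluster_indices_by_hamming_py_alt hashes md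
        = (pvReps hashes.length key2).map
            (fun r => (pvFiber hashes.length key2 r).map (fun k => (k : Int))) := by
  set n := hashes.length with hn
  set E := pvEdgeList hashes md with hE
  have hEn : ∀ e ∈ E, e.1 < n ∧ e.2 < n := fun e he => pvEdgeList_mem he
  set labels := pvLoop (n * n + 1) E (List.range n) with hlab
  set key2 : Nat → Nat := fun idx => labels.getD idx 0 with hkey2
  have hinit : ∀ x, x < n → pvERel E x ((List.range n).getD x 0) := by
    intro x hx
    have : (List.range n).getD x 0 = x := by
      have := pvStep_range n x
      unfold pvStep at this
      rw [this, if_pos hx]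
    rw [this]
    exact pvERel_refl E x
  have hsum : (List.range n).sum < n * n + 1 := by
    have := pvSum_range_le n
    omega
  obtain ⟨hlenL, hinvL, hedgeL⟩ := pvLoop_spec E n hEn (n * n + 1) (List.range n)
    (by simp) hinit hsum
  have hconn : ∀ a b, pvERel E a b → labels.getD a 0 = labels.getD b 0 := by
    intro a b h
    induction h with
    | rel u v huv => exact hedgeL (u, v) huv
    | refl u => rfl
    | symm u v _ ih => omega
    | trans u v w _ _ ih1 ih2 => omega
  have hfib : ∀ a b, a < n → b < n → (key2 a = key2 b ↔ pvERel E a b) := by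
    intro a b ha hb
    constructor
    · intro h
      have h1 := hinvL a ha
      have h2 := hinvL b hb
      have h2' : pvERel E b (labels.getD a 0) := by
        rw [show labels.getD a 0 = labels.getD b 0 from h]
        exact h2
      exact pvERel_trans h1 (pvERel_symm h2')
    · exact hconn a b
  refine ⟨key2, hfib, ?_⟩
  have halt : cluster_indices_by_hamming_py_alt hashes md
      = (pvDictGroup n key2).values.map (fun v => v.map (fun k => (k : Int))) := by
    unfold cluster_indices_by_hamming_py_alt pvDictGroup
    rw [show pvEdges hashes md = E from pvEdges_eq hashes md]
  rw [halt, pvDictGroup_values, List.map_map]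
  rfl

theorem pvMain (hashes : List (Option Int)) (md : Int) :
    cluster_indices_by_hamming_py hashes md = cluster_indices_by_hamming_py_alt hashes md := by
  by_cases hne : hashes = []
  · subst hne
    rw [show cluster_indices_by_hamming_py [] md = [] from by
      unfold cluster_indices_by_hamming_py; rw [if_pos rfl]]
    rfl
  · obtain ⟨key1, hfib1, hA⟩ := pvA_canon hashes md hne
    obtain ⟨key2, hfib2, hB⟩ := pvB_canon hashes md
    have hfib : ∀ a b, a < hashes.length → b < hashes.length →
        (key1 a = key1 b ↔ key2 a = key2 b) := by
      intro a b ha hb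
      rw [hfib1 a b ha hb, hfib2 a b ha hb]
    obtain ⟨hreps, hfibers⟩ := pvRepsFibers_congr hashes.length key1 key2 hfib
    rw [hA, hB, hreps]
    apply List.map_congr_left
    intro r hr
    have hrn : r < hashes.length := (pvReps_mem.mp (hreps ▸ hr)).1
    rw [hfibers r hrn]

-- ===== VERDICT (by name: the statement is the Claim_ definition above) =====
theorem cluster_indices_by_hamming_py_spec : Claim_equal_cluster_indices_by_hamming_py := by
  intro hashes max_distance _
  exact pvMain hashes max_distance
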